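-- pv_equiv track=rewrite | github.com/SanthoshReddy352/Friday_Linux | core/gemma_router.py | normalize_tool_name
-- ===== SOURCE A (Python) =====
-- def normalize_tool_name(predicted: str | None, allowed: list[str]) -> str | None:
--     """Map a model-predicted name (which may be a shortened form like
--     "time" or "weather") to an exact registered tool name.
--
--     Strategy: case-insensitive exact match → suffix match
--     (``time`` → ``get_time``) → substring match. Returns the original
--     ``predicted`` value unchanged when no allowed tool exists, so
--     callers can still see what the model said.
--     """
--     if not predicted:
--         return predicted
--     lowered = predicted.strip().lower()
--     if not lowered:
--         return predicted
--     allowed_lower = {a.lower(): a for a in allowed}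
--     if lowered in allowed_lower:
--         return allowed_lower[lowered]
--     # suffix: predicted="time" → "get_time"
--     for low, real in allowed_lower.items():
--         if low.endswith("_" + lowered) or low == "get_" + lowered:
--             return real
--     # substring
--     for low, real in allowed_lower.items():
--         if lowered in low.split("_"):
--             return real
--     return predicted
-- ===== SOURCE B (Python) =====
-- def normalize_tool_name(predicted: str | None, allowed: list[str]) -> str | None:
--     """Single ranked pass: exact match via dict membership, then one scan over
--     allowed_lower keeping the best-ranked candidate (suffix=2 beats token=3,
--     first encounter wins ties)."""
--     if not predicted:
--         return predicted
--     lowered = predicted.strip().lower()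
--     if not lowered:
--         return predicted
--     allowed_lower = {a.lower(): a for a in allowed}
--     if lowered in allowed_lower:
--         return allowed_lower[lowered]
--     best_rank = None
--     best = None
--     for low, real in allowed_lower.items():
--         if low.endswith("_" + lowered) or low == "get_" + lowered:
--             rank = 2
--         elif lowered in low.split("_"):
--             rank = 3
--         else:
--             continue
--         if best_rank is None or rank < best_rank:
--             best_rank, best = rank, real
--     return best if best is not None else predicted
-- ===== Notes on version B (the rewrite author's own statement) =====
-- stated objective: alternative
-- what changed: Replaced A's two sequential scans over allowed_lower (suffix tier, then substring tier) with a single ranked pass that keeps the best-ranked match so far (suffix=2, token=3, strict-< update so first encounter wins ties).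
import Mathlib
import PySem

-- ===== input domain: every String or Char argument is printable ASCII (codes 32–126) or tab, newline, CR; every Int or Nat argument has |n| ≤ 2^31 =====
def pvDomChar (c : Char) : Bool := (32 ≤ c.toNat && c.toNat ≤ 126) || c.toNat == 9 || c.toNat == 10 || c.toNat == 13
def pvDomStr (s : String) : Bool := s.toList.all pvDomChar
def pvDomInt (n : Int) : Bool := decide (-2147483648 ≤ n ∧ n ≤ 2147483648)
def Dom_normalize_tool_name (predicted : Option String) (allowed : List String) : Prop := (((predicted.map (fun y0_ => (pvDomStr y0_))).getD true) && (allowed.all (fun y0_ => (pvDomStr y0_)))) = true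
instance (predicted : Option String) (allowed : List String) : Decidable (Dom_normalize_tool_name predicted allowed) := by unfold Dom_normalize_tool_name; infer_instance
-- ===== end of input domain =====

-- One honest line: B collapses A's two sequential tier scans into a single ranked
-- pass keeping the best match so far; same cost, different decomposition.

-- shared match predicates (the identical Python expressions occur in both A and B)
def pvSuffixHit (lowered low : String) : Bool :=
  PySem.Str.endswith low ("_" ++ lowered) || low == "get_" ++ lowered

def pvTokenHit (lowered low : String) : Bool :=
  (PySem.Chars.splitOn low.toList ['_']).contains lowered.toList

-- ===== PORT A =====
-- A's first loop: return the first suffix match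
def pvLoopSuffix (lowered : String) : List (String × String) → Option String
  | [] => none
  | (low, real) :: rest =>
      if pvSuffixHit lowered low then some real else pvLoopSuffix lowered rest

-- A's second loop: return the first token-substring match
def pvLoopToken (lowered : String) : List (String × String) → Option String
  | [] => none
  | (low, real) :: rest =>
      if pvTokenHit lowered low then some real else pvLoopToken lowered rest

def normalize_tool_name (predicted : Option String) (allowed : List String) : Option String :=
  match predicted with
  | none => none
  | some p =>
    if p == "" then some p
    else
      let lowered := PySem.Str.lower (PySem.Str.strip p)
      if lowered == "" then some p
      else
        let allowed_lower : PySem.Dict String String :=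
          allowed.foldl (fun d a => d.insert (PySem.Str.lower a) a) PySem.Dict.empty
        match allowed_lower.get? lowered with
        | some real => some real
        | none =>
          match pvLoopSuffix lowered allowed_lower.items with
          | some real => some real
          | none =>
            match pvLoopToken lowered allowed_lower.items with
            | some real => some real
            | none => some p

-- ===== PORT B =====
-- B's single ranked pass: rank 2 = suffix match, rank 3 = token match, strict-< update
def pvRankOf (lowered low : String) : Option Nat :=
  if pvSuffixHit lowered low then some 2
  else if pvTokenHit lowered low then some 3
  else none

def pvStep (lowered : String) (best : Option (Nat × String)) (item : String × String) :
    Option (Nat × String) :=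
  match pvRankOf lowered item.1 with
  | none => best
  | some r =>
    match best with
    | none => some (r, item.2)
    | some (br, bv) => if r < br then some (r, item.2) else some (br, bv)

def normalize_tool_name_alt (predicted : Option String) (allowed : List String) : Option String :=
  match predicted with
  | none => none
  | some p =>
    if p == "" then some p
    else
      let lowered := PySem.Str.lower (PySem.Str.strip p)
      if lowered == "" then some p
      else
        let allowed_lower : PySem.Dict String String :=
          allowed.foldl (fun d a => d.insert (PySem.Str.lower a) a) PySem.Dict.empty
        match allowed_lower.get? lowered with
        | some real => some real
        | none =>
          match allowed_lower.items.foldl (pvStep lowered) none with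
          | some (_, real) => some real
          | none => some p

-- ===== PRECONDITION & SPEC =====
def Spec_normalize_tool_name (predicted : Option String) (allowed : List String) (out : Option String) : Prop := out = normalize_tool_name_alt predicted allowed
instance (predicted : Option String) (allowed : List String) (out : Option String) : Decidable (Spec_normalize_tool_name predicted allowed out) := by unfold Spec_normalize_tool_name; infer_instance

-- ===== CLAIM (what is proved, stated in full; the proofs are below) =====
def Claim_equal_normalize_tool_name : Prop := ∀ (predicted : Option String) (allowed : List String), Dom_normalize_tool_name predicted allowed → Spec_normalize_tool_name predicted allowed (normalize_tool_name predicted allowed)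

-- ===== LEMMAS AND PROOFS =====

-- once the fold holds a rank-2 match, nothing can replace it
theorem pvFold_rank2 (lowered v : String) (l : List (String × String)) :
    l.foldl (pvStep lowered) (some (2, v)) = some (2, v) := by
  induction l with
  | nil => rfl
  | cons hd tl ih =>
    simp only [List.foldl_cons, pvStep, pvRankOf]
    split_ifs <;> simp [ih]

-- fold from a rank-3 state: overtaken exactly by the first suffix match
theorem pvFold_rank3 (lowered v : String) (l : List (String × String)) :
    l.foldl (pvStep lowered) (some (3, v)) =
      match pvLoopSuffix lowered l with
      | some r => some (2, r)
      | none => some (3, v) := by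
  induction l generalizing v with
  | nil => rfl
  | cons hd tl ih =>
    obtain ⟨low, real⟩ := hd
    simp only [List.foldl_cons, pvStep, pvRankOf, pvLoopSuffix]
    by_cases hs : pvSuffixHit lowered low
    · simp [hs, pvFold_rank2]
    · by_cases ht : pvTokenHit lowered low <;> simp [hs, ht, ih]

-- fold from the empty state computes A's two-tier result
theorem pvFold_none (lowered : String) (l : List (String × String)) :
    l.foldl (pvStep lowered) none =
      match pvLoopSuffix lowered l with
      | some r => some (2, r)
      | none =>
        match pvLoopToken lowered l with
        | some r => some (3, r)
        | none => none := by
  induction l with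
  | nil => rfl
  | cons hd tl ih =>
    obtain ⟨low, real⟩ := hd
    simp only [List.foldl_cons, pvStep, pvRankOf, pvLoopSuffix, pvLoopToken]
    by_cases hs : pvSuffixHit lowered low
    · simp [hs, pvFold_rank2]
    · by_cases ht : pvTokenHit lowered low
      · simp [hs, ht, pvFold_rank3]
      · simp [hs, ht, ih]

-- ===== VERDICT (by name: the statement is the Claim_ definition above) =====
theorem normalize_tool_name_spec : Claim_equal_normalize_tool_name := by
  intro predicted allowed _
  unfold Spec_normalize_tool_name normalize_tool_name normalize_tool_name_alt
  cases predicted with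
  | none => rfl
  | some p =>
    by_cases hp : p == ""
    · simp [hp]
    · simp only [hp]
      by_cases hl : PySem.Str.lower (PySem.Str.strip p) == ""
      · simp [hl]
      · simp only [hl]
        set d := allowed.foldl (fun d a => d.insert (PySem.Str.lower a) a) PySem.Dict.empty
        cases d.get? (PySem.Str.lower (PySem.Str.strip p)) with
        | some real => rfl
        | none =>
          rw [pvFold_none]
          cases hs : pvLoopSuffix (PySem.Str.lower (PySem.Str.strip p)) d.items with
          | some r => rfl
          | none =>
            cases pvLoopToken (PySem.Str.lower (PySem.Str.strip p)) d.items <;> rfl
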